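-- pv_equiv track=rewrite | github.com/eliottcassidy2000/math | 04-computation/a000665_enum.py | permcount
-- ===== SOURCE A (Python) =====
-- from math import gcd, factorial, ceil
--
-- def permcount(v):
--     """Permutation count: s!/m where s=sum(v), m=prod(v_i * running_freq)."""
--     m = 1
--     s = 0
--     k = 0
--     for i, t in enumerate(v):
--         if i > 0 and t == v[i - 1]:
--             k += 1
--         else:
--             k = 1
--         m *= t * k
--         s += t
--     return factorial(s) // m
-- ===== SOURCE B (Python) =====
-- from math import comb, factorial
--
-- def permcount(v):
--     """Permutation count: s!/m where s=sum(v), m=prod(v_i * running_freq)."""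
--     res = 1
--     s = 0
--     prev = None
--     k = 0
--     for t in v:
--         s += t
--         k = k + 1 if t == prev else 1
--         # adding a block of size t to s-t items: choose its members, arrange
--         # them cyclically, and correct for the k-th repeat of an equal block;
--         # each division is exact, so no big final factorial is ever formed
--         res = res * comb(s, t) * factorial(t - 1) // k
--         prev = t
--     return res
-- ===== Notes on version B (the rewrite author's own statement) =====
-- stated objective: alternative
-- what changed: B never forms factorial(sum(v)) or prod(v) and performs no final division: it counts incrementally as a product of binomial coefficients, res = res * comb(s, t) * factorial(t-1) // k per element with s the running prefix sum, each division being exact.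
-- outside the precondition, e.g. on permcount([-1, 3]): A returns -1, B raises ValueError; on permcount([0, 2]): A raises ZeroDivisionError, B raises ValueError
import Mathlib
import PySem

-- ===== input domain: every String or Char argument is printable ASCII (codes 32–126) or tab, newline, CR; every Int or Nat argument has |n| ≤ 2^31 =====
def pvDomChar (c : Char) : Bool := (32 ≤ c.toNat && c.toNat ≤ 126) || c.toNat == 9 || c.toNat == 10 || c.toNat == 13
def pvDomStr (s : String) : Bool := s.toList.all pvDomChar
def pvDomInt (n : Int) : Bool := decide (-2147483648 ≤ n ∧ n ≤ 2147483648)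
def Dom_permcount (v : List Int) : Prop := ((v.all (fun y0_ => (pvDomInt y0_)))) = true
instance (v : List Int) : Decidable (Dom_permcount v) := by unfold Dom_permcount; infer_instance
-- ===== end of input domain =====

-- B is a different algorithm: instead of A's factorial(sum(v)) divided once by an accumulated
-- product, B multiplies per-element binomial coefficients of the running prefix sum with exact
-- stepwise divisions, never forming factorial(sum(v)) or prod(v) (objective: alternative).

-- ===== PORT A =====
-- loop body of A: state (m, s, k), element (i, t); the comparison t == v[i-1] is v's pyGet?
-- (the i > 0 guard makes the lookup in range exactly where Python performs it)
def permcountBody (v : List Int) (st : Int × Int × Int) (p : Int × Int) : Int × Int × Int :=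
  let k := if p.1 > 0 ∧ PySem.List.pyGet? v (p.1 - 1) = some p.2 then st.2.2 + 1 else 1
  (st.1 * (p.2 * k), st.2.1 + p.2, k)

def permcount (v : List Int) : Int :=
  let r := (PySem.List.enumerate v).foldl (permcountBody v) (1, 0, 0)
  -- factorial(s): exact for 0 ≤ s (Pre_ excludes inputs where Python raises)
  PySem.Int.floordiv ((Nat.factorial r.2.1.toNat : Nat) : Int) r.1

-- ===== PORT B =====
-- loop body of B: state (res, s, prev, k); comb(s, t) and factorial(t - 1) are exact via
-- Nat.choose / Nat.factorial on toNat, faithful on Pre_ (s ≥ t ≥ 1 there; outside Pre_ the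
-- Python raises ValueError)
def permcountAltBody (st : Int × Int × Option Int × Int) (t : Int) : Int × Int × Option Int × Int :=
  let s := st.2.1 + t
  let k := if st.2.2.1 = some t then st.2.2.2 + 1 else 1
  (PySem.Int.floordiv (st.1 * ((Nat.choose s.toNat t.toNat : Nat) : Int)
      * ((Nat.factorial (t - 1).toNat : Nat) : Int)) k, s, some t, k)

def permcount_alt (v : List Int) : Int :=
  (v.foldl permcountAltBody (1, 0, none, 0)).1

-- ===== PRECONDITION & SPEC =====
-- Pre_ restricts to lists of positive integers, the natural domain of a permutation count.
-- Outside it A raises on part of the inputs (0 ∈ v → ZeroDivisionError, sum < 0 → ValueError)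
-- and on the rest (a negative element but a nonnegative sum) A returns a floor-division
-- artefact of a negative accumulator while B's comb/factorial raise ValueError.
def Pre_permcount (v : List Int) : Prop := ∀ x ∈ v, 1 ≤ x
instance (v : List Int) : Decidable (Pre_permcount v) := by unfold Pre_permcount; infer_instance
def pvWitness_permcount : List Int := [2, 2, 3]

def Spec_permcount (v : List Int) (out : Int) : Prop := out = permcount_alt v
instance (v : List Int) (out : Int) : Decidable (Spec_permcount v out) := by unfold Spec_permcount; infer_instance

-- ===== CLAIM (what is proved, stated in full; the proofs are below) =====
def Claim_equal_permcount : Prop := ∀ (v : List Int), Dom_permcount v → Pre_permcount v → Spec_permcount v (permcount v)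

-- ===== LEMMAS AND PROOFS =====

-- proof-side reformulation of A's loop: carry the previous element instead of indexing
def prevStep (st : (Int × Int × Int) × Option Int) (t : Int) : (Int × Int × Int) × Option Int :=
  let k := if st.2 = some t then st.1.2.2 + 1 else 1
  ((st.1.1 * (t * k), st.1.2.1 + t, k), some t)

lemma foldA_eq_prev (rest : List Int) : ∀ (pre : List Int) (st : Int × Int × Int),
    (PySem.List.enumerate rest (pre.length : Int)).foldl (permcountBody (pre ++ rest)) st
      = (rest.foldl prevStep (st, pre.getLast?)).1 := by
  induction rest with
  | nil => intro pre st; simp [PySem.List.enumerate_nil]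
  | cons t rest' ih =>
    intro pre st
    rw [PySem.List.enumerate_cons, List.foldl_cons, List.foldl_cons]
    have hcond : (((pre.length : Int) > 0 ∧ PySem.List.pyGet? (pre ++ t :: rest') ((pre.length : Int) - 1) = some t) : Prop)
        ↔ (pre.getLast? = some t) := by
      cases hpre : pre.getLast? with
      | none =>
        have : pre = [] := by
          cases pre with
          | nil => rfl
          | cons a l => simp [List.getLast?] at hpre
        subst this; simp
      | some y =>
        have hne : pre ≠ [] := by intro h; subst h; simp at hpre
        have hlen : 0 < pre.length := List.length_pos_iff.mpr hne
        have hy : pre.getLast hne = y := by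
          have := (List.getLast?_eq_some_getLast hne).symm.trans hpre
          simpa using this
        have hdl : pre ++ t :: rest' = pre.dropLast ++ y :: (t :: rest') := by
          conv_lhs => rw [← List.dropLast_concat_getLast hne, hy]
          simp
        have hidx : ((pre.length : Int) - 1) = ((pre.dropLast.length : Nat) : Int) := by
          simp [List.length_dropLast]; omega
        have hget : PySem.List.pyGet? (pre ++ t :: rest') ((pre.length : Int) - 1) = some y := by
          rw [hdl, hidx]
          exact PySem.List.pyGet?_append_length pre.dropLast (t :: rest') y
        constructor
        · rintro ⟨-, h⟩; rw [hget] at h; simp at h; simp [h]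
        · intro h
          have hyt : y = t := by simpa [hpre] using h
          exact ⟨by exact_mod_cast hlen, by rw [hget, hyt]⟩
    have hbody : permcountBody (pre ++ t :: rest') st ((pre.length : Int), t)
        = (prevStep (st, pre.getLast?) t).1 := by
      simp only [permcountBody, prevStep]
      by_cases h : pre.getLast? = some t
      · rw [if_pos (hcond.mpr h), if_pos h]
      · rw [if_neg (fun hh => h (hcond.mp hh)), if_neg h]
    have harr : pre ++ t :: rest' = (pre ++ [t]) ++ rest' := by simp
    have hlen' : (pre.length : Int) + 1 = ((pre ++ [t]).length : Int) := by simp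
    rw [hbody, hlen', harr, ih (pre ++ [t])]
    have hgl : (pre ++ [t]).getLast? = some t := List.getLast?_concat
    rw [hgl]
    rfl

-- the run-length encoding of the processed prefix, used only in the proofs
def runStep (runs : List (Int × Int)) (x : Int) : List (Int × Int) :=
  match runs.getLast? with
  | some (y, r) => if y = x then runs.dropLast ++ [(y, r + 1)] else runs ++ [(x, 1)]
  | none => [(x, 1)]

def runsOf (v : List Int) : List (Int × Int) := v.foldl runStep []

-- product of factorials of the run lengths
def prodFact (runs : List (Int × Int)) : Int :=
  runs.foldl (fun d p => d * ((Nat.factorial p.2.toNat : Nat) : Int)) 1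

lemma prodFact_append (runs : List (Int × Int)) (p : Int × Int) :
    prodFact (runs ++ [p]) = prodFact runs * ((Nat.factorial p.2.toNat : Nat) : Int) := by
  simp [prodFact, List.foldl_append]

lemma foldl_mul_fact (runs : List (Int × Int)) : ∀ (a : Int),
    runs.foldl (fun d p => d * ((Nat.factorial p.2.toNat : Nat) : Int)) a = a * prodFact runs := by
  induction runs with
  | nil => intro a; simp [prodFact]
  | cons p l ih =>
    intro a
    have h2 : prodFact (p :: l) = ((Nat.factorial p.2.toNat : Nat) : Int) * prodFact l := by
      show List.foldl (fun d p => d * ((Nat.factorial p.2.toNat : Nat) : Int))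
          (1 * ((Nat.factorial p.2.toNat : Nat) : Int)) l = _
      rw [ih]; ring
    simp only [List.foldl_cons, ih, h2]
    ring

lemma prodFact_cons (p : Int × Int) (l : List (Int × Int)) :
    prodFact (p :: l) = ((Nat.factorial p.2.toNat : Nat) : Int) * prodFact l := by
  show List.foldl _ (1 * ((Nat.factorial p.2.toNat : Nat) : Int)) l = _
  rw [foldl_mul_fact]; ring

-- helpers for describing the prev/k state in terms of the run list
def lastVal (runs : List (Int × Int)) : Option Int := (runs.getLast?).map Prod.fst
def lastLen (runs : List (Int × Int)) : Int := ((runs.getLast?).map Prod.snd).getD 0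

-- invariant relating A's prev-fold to the run list (A's side)
lemma main_inv (v : List Int) : ∀ (runs : List (Int × Int)) (m s : Int),
    (∀ p ∈ runs, 1 ≤ p.2) →
    let res := v.foldl prevStep ((m, s, lastLen runs), lastVal runs)
    let R := v.foldl runStep runs
    res.1.1 * prodFact runs = m * v.prod * prodFact R ∧
    res.1.2.1 = s + v.sum ∧ res.1.2.2 = lastLen R ∧ res.2 = lastVal R ∧
    (∀ p ∈ R, 1 ≤ p.2) := by
  induction v with
  | nil =>
    intro runs m s hpos
    exact ⟨by simp, by simp, rfl, rfl, hpos⟩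
  | cons t rest ih =>
    intro runs m s hpos
    simp only [List.foldl_cons]
    cases hlast : runs.getLast? with
    | none =>
      have hnil : runs = [] := by
        cases runs with
        | nil => rfl
        | cons a l => simp [List.getLast?] at hlast
      subst hnil
      have hstep : prevStep ((m, s, lastLen []), lastVal []) t = ((m * (t * 1), s + t, 1), some t) := by
        simp [prevStep, lastVal]
      have hrun : runStep [] t = [(t, 1)] := by simp [runStep]
      rw [hstep, hrun]
      have h1 : lastLen [(t, 1)] = 1 := rfl
      have h2 : lastVal [(t, 1)] = some t := rfl
      have := ih [(t, 1)] (m * (t * 1)) (s + t) (by intro p hp; simp at hp; simp [hp])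
      rw [h1, h2] at *
      obtain ⟨hm, hs, hk, hv, hall⟩ := this
      refine ⟨?_, by simpa [add_assoc] using hs, hk, hv, hall⟩
      have hpf : prodFact [(t, 1)] = 1 := by simp [prodFact]
      rw [hpf] at hm
      simpa [prodFact, mul_assoc, mul_comm, mul_left_comm] using hm
    | some pr =>
      obtain ⟨y, r⟩ := pr
      have hne : runs ≠ [] := by intro h; subst h; simp at hlast
      have hr1 : 1 ≤ r := by
        have := hpos (y, r) (List.mem_of_getLast? hlast)
        simpa using this
      have hdec : runs = runs.dropLast ++ [(y, r)] := by
        have hy : runs.getLast hne = (y, r) := by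
          have := (List.getLast?_eq_some_getLast hne).symm.trans hlast
          simpa using this
        rw [← hy]; exact (List.dropLast_concat_getLast hne).symm
      have hlv : lastVal runs = some y := by simp [lastVal, hlast]
      have hll : lastLen runs = r := by simp [lastLen, hlast]
      have hposdl : ∀ p ∈ runs.dropLast ++ [(y, r + 1)], 1 ≤ p.2 := by
        intro p hp
        rcases List.mem_append.mp hp with h | h
        · exact hpos p (List.mem_of_mem_dropLast h)
        · simp at h; subst h; omega
      by_cases hy : y = t
      · replace hy := hy.symm; subst hy
        have hstep : prevStep ((m, s, lastLen runs), lastVal runs) t = ((m * (t * (r + 1)), s + t, r + 1), some t) := by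
          simp [prevStep, hlv, hll]
        have hrun : runStep runs t = runs.dropLast ++ [(t, r + 1)] := by
          simp [runStep, hlast]
        rw [hstep, hrun]
        have h1 : lastLen (runs.dropLast ++ [(t, r + 1)]) = r + 1 := by
          simp [lastLen]
        have h2 : lastVal (runs.dropLast ++ [(t, r + 1)]) = some t := by
          simp [lastVal]
        have := ih (runs.dropLast ++ [(t, r + 1)]) (m * (t * (r + 1))) (s + t) (by exact hposdl)
        rw [h1, h2] at this
        obtain ⟨hm, hs, hk, hv, hall⟩ := this
        refine ⟨?_, by simpa [add_assoc] using hs, hk, hv, hall⟩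
        have hfr : prodFact runs = prodFact runs.dropLast * ((Nat.factorial r.toNat : Nat) : Int) := by
          conv_lhs => rw [hdec]
          exact prodFact_append _ _
        have hfr' : prodFact (runs.dropLast ++ [(t, r + 1)])
            = prodFact runs.dropLast * ((Nat.factorial (r + 1).toNat : Nat) : Int) := prodFact_append _ _
        have hfact : ((Nat.factorial (r + 1).toNat : Nat) : Int)
            = ((Nat.factorial r.toNat : Nat) : Int) * (r + 1) := by
          have hn : (r + 1).toNat = r.toNat + 1 := by omega
          rw [hn, Nat.factorial_succ]
          push_cast
          have : ((r.toNat : Int)) = r := by omega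
          rw [this]; ring
        have hcancel : (r + 1) ≠ (0 : Int) := by omega
        apply mul_right_cancel₀ hcancel
        calc (rest.foldl prevStep ((m * (t * (r + 1)), s + t, r + 1), some t)).1.1 * prodFact runs * (r + 1)
            = (rest.foldl prevStep ((m * (t * (r + 1)), s + t, r + 1), some t)).1.1
                * prodFact (runs.dropLast ++ [(t, r + 1)]) := by
              rw [hfr, hfr', hfact]; ring
          _ = m * (t * (r + 1)) * rest.prod * prodFact (rest.foldl runStep (runs.dropLast ++ [(t, r + 1)])) := hm
          _ = m * (t :: rest).prod * prodFact (rest.foldl runStep (runs.dropLast ++ [(t, r + 1)])) * (r + 1) := by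
              rw [List.prod_cons]; ring
      · have hstep : prevStep ((m, s, lastLen runs), lastVal runs) t = ((m * (t * 1), s + t, 1), some t) := by
          simp [prevStep, hlv, hy, Ne.symm]
        have hrun : runStep runs t = runs ++ [(t, 1)] := by
          simp [runStep, hlast, hy]
        rw [hstep, hrun]
        have h1 : lastLen (runs ++ [(t, 1)]) = 1 := by simp [lastLen]
        have h2 : lastVal (runs ++ [(t, 1)]) = some t := by simp [lastVal]
        have := ih (runs ++ [(t, 1)]) (m * (t * 1)) (s + t)
          (by intro p hp; rcases List.mem_append.mp hp with h | h
              · exact hpos p h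
              · simp at h; subst h; simp)
        rw [h1, h2] at this
        obtain ⟨hm, hs, hk, hv, hall⟩ := this
        refine ⟨?_, by simpa [add_assoc] using hs, hk, hv, hall⟩
        have hfr : prodFact (runs ++ [(t, 1)]) = prodFact runs := by
          rw [prodFact_append]; simp
        rw [hfr] at hm
        calc (rest.foldl prevStep ((m * (t * 1), s + t, 1), some t)).1.1 * prodFact runs
            = m * (t * 1) * rest.prod * prodFact (rest.foldl runStep (runs ++ [(t, 1)])) := hm
          _ = m * (t :: rest).prod * prodFact (rest.foldl runStep (runs ++ [(t, 1)])) := by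
              rw [List.prod_cons]; ring

lemma loopA_eq (v : List Int) :
    (PySem.List.enumerate v).foldl (permcountBody v) (1, 0, 0)
      = (v.prod * prodFact (runsOf v), v.sum, lastLen (runsOf v)) := by
  show _ = (v.prod * prodFact (v.foldl runStep []), v.sum, lastLen (v.foldl runStep []))
  have h0 := foldA_eq_prev v [] (1, 0, 0)
  simp only [List.length_nil, Nat.cast_zero, List.nil_append, List.getLast?_nil] at h0
  have h1 := main_inv v [] 1 0 (by intro p hp; simp at hp)
  simp only [lastLen, lastVal, List.getLast?_nil, Option.map_none, Option.getD_none] at h1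
  obtain ⟨hm, hs, hk, -, -⟩ := h1
  have hpf : prodFact ([] : List (Int × Int)) = 1 := by simp [prodFact]
  rw [hpf, mul_one, one_mul] at hm
  have : PySem.List.enumerate v = PySem.List.enumerate v 0 := rfl
  rw [this, h0]
  ext1
  · exact hm
  · ext1
    · simpa using hs
    · simpa [lastLen] using hk

-- ===== B-side machinery =====

def runsWF (runs : List (Int × Int)) : Prop := ∀ p ∈ runs, 1 ≤ p.1 ∧ 1 ≤ p.2
def wsum (runs : List (Int × Int)) : Int := (runs.map (fun p => p.1 * p.2)).sum
def vprod (runs : List (Int × Int)) : Int := (runs.map (fun p => p.1 ^ p.2.toNat)).prod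

lemma runsOf_append (p : List Int) (x : Int) :
    runsOf (p ++ [x]) = runStep (runsOf p) x := by
  simp [runsOf, List.foldl_append]

lemma lastVal_runStep (runs : List (Int × Int)) (x : Int) :
    lastVal (runStep runs x) = some x := by
  unfold runStep
  cases hlast : runs.getLast? with
  | none => simp [lastVal]
  | some pr =>
    obtain ⟨y, r⟩ := pr
    by_cases hy : y = x
    · subst hy; simp [lastVal]
    · simp [hy, lastVal]

lemma lastLen_runStep (runs : List (Int × Int)) (x : Int) :
    lastLen (runStep runs x) = if lastVal runs = some x then lastLen runs + 1 else 1 := by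
  unfold runStep
  cases hlast : runs.getLast? with
  | none => simp [lastVal, lastLen, hlast]
  | some pr =>
    obtain ⟨y, r⟩ := pr
    by_cases hy : y = x
    · subst hy; simp [lastVal, lastLen, hlast]
    · simp [lastVal, lastLen, hlast, hy]

lemma lastVal_runsOf (p : List Int) : lastVal (runsOf p) = p.getLast? := by
  induction p using List.reverseRecOn with
  | nil => simp [runsOf, lastVal]
  | append_singleton l x ih => rw [runsOf_append, lastVal_runStep, List.getLast?_concat]

lemma runStep_props (runs : List (Int × Int)) (x : Int) (hwf : runsWF runs) (hx : 1 ≤ x) :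
    runsWF (runStep runs x) ∧ wsum (runStep runs x) = wsum runs + x ∧
    vprod (runStep runs x) = vprod runs * x ∧
    prodFact (runStep runs x) = prodFact runs * (if lastVal runs = some x then lastLen runs + 1 else 1) := by
  unfold runStep
  cases hlast : runs.getLast? with
  | none =>
    have hnil : runs = [] := by
      cases runs with
      | nil => rfl
      | cons a l => simp [List.getLast?] at hlast
    subst hnil
    refine ⟨?_, by simp [wsum], by simp [vprod], ?_⟩
    · intro p hp; simp at hp; subst hp; exact ⟨hx, le_refl 1⟩
    · simp [prodFact, lastVal]
  | some pr =>
    obtain ⟨y, r⟩ := pr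
    have hne : runs ≠ [] := by intro h; subst h; simp at hlast
    have hyr := hwf (y, r) (List.mem_of_getLast? hlast)
    have hdec : runs = runs.dropLast ++ [(y, r)] := by
      have hy : runs.getLast hne = (y, r) := by
        have := (List.getLast?_eq_some_getLast hne).symm.trans hlast
        simpa using this
      rw [← hy]; exact (List.dropLast_concat_getLast hne).symm
    have hlv : lastVal runs = some y := by simp [lastVal, hlast]
    have hll : lastLen runs = r := by simp [lastLen, hlast]
    have hwd : wsum runs = wsum runs.dropLast + y * r := by
      conv_lhs => rw [hdec]
      simp [wsum]
    have hvd : vprod runs = vprod runs.dropLast * y ^ r.toNat := by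
      conv_lhs => rw [hdec]
      simp [vprod]
    have hfd : prodFact runs = prodFact runs.dropLast * ((Nat.factorial r.toNat : Nat) : Int) := by
      conv_lhs => rw [hdec]
      exact prodFact_append _ _
    by_cases hy : y = x
    · subst hy
      simp only [if_true]
      refine ⟨?_, ?_, ?_, ?_⟩
      · intro p hp
        rcases List.mem_append.mp hp with h | h
        · exact hwf p (List.mem_of_mem_dropLast h)
        · simp at h; subst h; exact ⟨hyr.1, by omega⟩
      · have : wsum (runs.dropLast ++ [(y, r + 1)]) = wsum runs.dropLast + y * (r + 1) := by
          simp [wsum]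
        rw [this, hwd]; ring
      · have : vprod (runs.dropLast ++ [(y, r + 1)]) = vprod runs.dropLast * y ^ (r + 1).toNat := by
          simp [vprod]
        rw [this, hvd]
        have hn : (r + 1).toNat = r.toNat + 1 := by omega
        rw [hn, pow_succ]; ring
      · rw [prodFact_append, hfd, hlv, if_pos rfl, hll]
        have hn : (r + 1).toNat = r.toNat + 1 := by omega
        have hfact : ((Nat.factorial (r.toNat + 1) : Nat) : Int)
            = ((Nat.factorial r.toNat : Nat) : Int) * (r + 1) := by
          rw [Nat.factorial_succ]
          push_cast
          have : ((r.toNat : Int)) = r := by omega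
          rw [this]; ring
        rw [hn, hfact]; ring
    · simp only [if_neg hy]
      have hcond : ¬ (lastVal runs = some x) := by
        rw [hlv]; intro h; exact hy (by simpa using h)
      refine ⟨?_, ?_, ?_, ?_⟩
      · intro p hp
        rcases List.mem_append.mp hp with h | h
        · exact hwf p h
        · simp at h; subst h; exact ⟨hx, le_refl 1⟩
      · simp [wsum]
      · simp [vprod]
      · rw [prodFact_append, if_neg hcond]
        simp

lemma runs_spec (p : List Int) (hp : ∀ x ∈ p, 1 ≤ x) :
    runsWF (runsOf p) ∧ wsum (runsOf p) = p.sum ∧ vprod (runsOf p) = p.prod := by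
  induction p using List.reverseRecOn with
  | nil => exact ⟨fun q hq => by simp [runsOf] at hq, by simp [runsOf, wsum], by simp [runsOf, vprod]⟩
  | append_singleton l x ih =>
    have hl : ∀ y ∈ l, 1 ≤ y := fun y hy => hp y (List.mem_append.mpr (Or.inl hy))
    have hx : 1 ≤ x := hp x (List.mem_append.mpr (Or.inr (by simp)))
    obtain ⟨hwf, hws, hvp⟩ := ih hl
    obtain ⟨h1, h2, h3, -⟩ := runStep_props (runsOf l) x hwf hx
    rw [runsOf_append]
    exact ⟨h1, by rw [h2, hws]; simp, by rw [h3, hvp]; simp⟩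

lemma prodFact_pos (runs : List (Int × Int)) : 0 < prodFact runs := by
  induction runs with
  | nil => simp [prodFact]
  | cons p l ih =>
    rw [prodFact_cons]
    have : 0 < ((Nat.factorial p.2.toNat : Nat) : Int) := by
      exact_mod_cast Nat.factorial_pos _
    positivity

lemma wsum_nonneg (runs : List (Int × Int)) (hwf : runsWF runs) : 0 ≤ wsum runs := by
  induction runs with
  | nil => simp [wsum]
  | cons p l ih =>
    have hp := hwf p (List.mem_cons_self ..)
    have hl := ih (fun q hq => hwf q (List.mem_cons_of_mem _ hq))
    have : wsum (p :: l) = p.1 * p.2 + wsum l := by simp [wsum]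
    rw [this]
    nlinarith [hp.1, hp.2]

-- t^r · r! divides (t·r)! (r groups of t elements each, Nat side)
lemma nat_run_dvd (tn rn : Nat) (ht : 1 ≤ tn) : tn ^ rn * rn.factorial ∣ (tn * rn).factorial := by
  have h1 : tn ^ rn ∣ tn.factorial ^ rn :=
    pow_dvd_pow_of_dvd (Nat.dvd_factorial ht le_rfl) rn
  have h2 : tn.factorial ^ rn * rn.factorial ∣ (rn * tn).factorial := by
    refine ⟨Nat.uniformBell rn tn, ?_⟩
    rw [← Nat.uniformBell_mul_eq rn (show tn ≠ 0 by omega)]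
    ring
  rw [Nat.mul_comm tn rn]
  exact (mul_dvd_mul_right h1 rn.factorial).trans h2

-- the denominator divides the factorial of the sum
lemma runs_dvd (rl : List (Int × Int)) (hwf : runsWF rl) :
    (vprod rl * prodFact rl) ∣ ((Nat.factorial (wsum rl).toNat : Nat) : Int) := by
  induction rl with
  | nil => simp [vprod, prodFact, wsum]
  | cons p rest ih =>
    obtain ⟨t, r⟩ := p
    have htr := hwf (t, r) (List.mem_cons_self ..)
    have hrest : runsWF rest := fun q hq => hwf q (List.mem_cons_of_mem _ hq)
    have ht : 1 ≤ t := htr.1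
    have hr : 1 ≤ r := htr.2
    have hwn := wsum_nonneg rest hrest
    have hvc : vprod ((t, r) :: rest) = t ^ r.toNat * vprod rest := by simp [vprod]
    have hwc : wsum ((t, r) :: rest) = t * r + wsum rest := by simp [wsum]
    have htc : (t : Int) = ((t.toNat : Nat) : Int) := by omega
    have hwtn : (wsum ((t, r) :: rest)).toNat = t.toNat * r.toNat + (wsum rest).toNat := by
      rw [hwc]
      have : t * r = ((t.toNat * r.toNat : Nat) : Int) := by
        push_cast; rw [Int.toNat_of_nonneg (by omega), Int.toNat_of_nonneg (by omega)]
      omega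
    have hnat1 : t.toNat ^ r.toNat * (r.toNat).factorial ∣ (t.toNat * r.toNat).factorial :=
      nat_run_dvd t.toNat r.toNat (by omega)
    have hnat2 : (t.toNat * r.toNat).factorial * ((wsum rest).toNat).factorial
        ∣ (t.toNat * r.toNat + (wsum rest).toNat).factorial :=
      Nat.factorial_mul_factorial_dvd_factorial_add _ _
    have hstep : ((t.toNat ^ r.toNat * (r.toNat).factorial : Nat) : Int)
        * (vprod rest * prodFact rest)
        ∣ (((t.toNat * r.toNat).factorial : Nat) : Int) * ((((wsum rest).toNat).factorial : Nat) : Int) :=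
      mul_dvd_mul (Int.natCast_dvd_natCast.mpr hnat1) (ih hrest)
    have hfin : (((t.toNat * r.toNat).factorial : Nat) : Int) * ((((wsum rest).toNat).factorial : Nat) : Int)
        ∣ ((Nat.factorial (wsum ((t, r) :: rest)).toNat : Nat) : Int) := by
      rw [hwtn]
      exact_mod_cast Int.natCast_dvd_natCast.mpr hnat2
    have heq : vprod ((t, r) :: rest) * prodFact ((t, r) :: rest)
        = ((t.toNat ^ r.toNat * (r.toNat).factorial : Nat) : Int) * (vprod rest * prodFact rest) := by
      rw [hvc, prodFact_cons]
      push_cast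
      rw [← htc]
      ring
    rw [heq]
    exact hstep.trans hfin

-- main invariant of B's loop
lemma foldB_inv (rest : List Int) : ∀ (pre : List Int),
    (∀ x ∈ pre, 1 ≤ x) → (∀ x ∈ rest, 1 ≤ x) →
    ∀ res : Int,
    res * (pre.prod * prodFact (runsOf pre)) = ((Nat.factorial pre.sum.toNat : Nat) : Int) →
    let st := rest.foldl permcountAltBody (res, pre.sum, pre.getLast?, lastLen (runsOf pre))
    st.1 * ((pre ++ rest).prod * prodFact (runsOf (pre ++ rest)))
        = ((Nat.factorial (pre ++ rest).sum.toNat : Nat) : Int) ∧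
    st.2.1 = (pre ++ rest).sum ∧ st.2.2.1 = (pre ++ rest).getLast? ∧
    st.2.2.2 = lastLen (runsOf (pre ++ rest)) := by
  induction rest with
  | nil =>
    intro pre hpre _ res hres
    exact ⟨by simpa using hres, by simp, by simp, by simp⟩
  | cons t rest' ih =>
    intro pre hpre hrest res hres
    have ht : 1 ≤ t := hrest t (List.mem_cons_self ..)
    have hrest' : ∀ x ∈ rest', 1 ≤ x := fun x hx => hrest x (List.mem_cons_of_mem _ hx)
    have hpre' : ∀ x ∈ pre ++ [t], 1 ≤ x := by
      intro x hx
      rcases List.mem_append.mp hx with h | h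
      · exact hpre x h
      · simp at h; subst h; exact ht
    obtain ⟨hwf, hws, hvp⟩ := runs_spec pre hpre
    obtain ⟨hwf', hws', hvp'⟩ := runs_spec (pre ++ [t]) hpre'
    -- abbreviations
    set R := runsOf pre with hR
    set kv : Int := if pre.getLast? = some t then lastLen R + 1 else 1 with hkvdef
    have hprops := runStep_props R t hwf ht
    have hrO : runsOf (pre ++ [t]) = runStep R t := runsOf_append pre t
    have hlvR : lastVal R = pre.getLast? := lastVal_runsOf pre
    have hkv : lastLen (runsOf (pre ++ [t])) = kv := by
      rw [hrO, lastLen_runStep, hlvR]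
    have hpF : prodFact (runsOf (pre ++ [t])) = prodFact R * kv := by
      rw [hrO, hprops.2.2.2, hlvR]
    -- positivity
    have hsumnn : 0 ≤ pre.sum := by rw [← hws]; exact wsum_nonneg R hwf
    have hlastlen_nn : 0 ≤ lastLen R := by
      cases hg : R.getLast? with
      | none => simp [lastLen, hg]
      | some q =>
        have := (hwf q (List.mem_of_getLast? hg)).2
        simp [lastLen, hg]; omega
    have hkvpos : 0 < kv := by
      rw [hkvdef]; split_ifs <;> omega
    have hprodpos : 0 < pre.prod := List.prod_pos (fun a ha => by have := hpre a ha; omega)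
    have hM'pos : 0 < (pre ++ [t]).prod * prodFact (runsOf (pre ++ [t])) := by
      have h1 : 0 < (pre ++ [t]).prod := List.prod_pos (fun a ha => by have := hpre' a ha; omega)
      exact mul_pos h1 (prodFact_pos _)
    have hsum' : (pre ++ [t]).sum = pre.sum + t := by simp
    have hdvd : ((pre ++ [t]).prod * prodFact (runsOf (pre ++ [t])))
        ∣ ((Nat.factorial (pre.sum + t).toNat : Nat) : Int) := by
      have h := runs_dvd (runsOf (pre ++ [t])) hwf'
      rw [hws', hvp', hsum'] at h
      exact h
    obtain ⟨Q, hQ⟩ := hdvd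
    have hM' : (pre ++ [t]).prod * prodFact (runsOf (pre ++ [t]))
        = (pre.prod * prodFact R) * (t * kv) := by
      rw [hpF]; simp [List.prod_append]; ring
    have hsplit : (pre.sum + t).toNat = pre.sum.toNat + t.toNat := by omega
    have hchoose : (Nat.choose (pre.sum.toNat + t.toNat) t.toNat) * (Nat.factorial t.toNat)
        * (Nat.factorial pre.sum.toNat) = Nat.factorial (pre.sum.toNat + t.toNat) := by
      have h := Nat.choose_mul_factorial_mul_factorial
        (show t.toNat ≤ pre.sum.toNat + t.toNat by omega)
      simpa [Nat.add_sub_cancel] using h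
    have hC : ((Nat.choose (pre.sum + t).toNat t.toNat : Nat) : Int)
        * ((Nat.factorial t.toNat : Nat) : Int) * ((Nat.factorial pre.sum.toNat : Nat) : Int)
        = ((Nat.factorial (pre.sum + t).toNat : Nat) : Int) := by
      rw [hsplit]
      exact_mod_cast hchoose
    have hfactt : ((Nat.factorial (t - 1).toNat : Nat) : Int) * t
        = ((Nat.factorial t.toNat : Nat) : Int) := by
      have h1 : t.toNat = (t - 1).toNat + 1 := by omega
      rw [h1, Nat.factorial_succ]
      push_cast
      have h2 : (((t - 1).toNat : Int)) = t - 1 := by omega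
      rw [h2]; ring
    have hX : res * ((Nat.choose (pre.sum + t).toNat t.toNat : Nat) : Int)
        * ((Nat.factorial (t - 1).toNat : Nat) : Int) = kv * Q := by
      apply mul_right_cancel₀ (ne_of_gt hM'pos)
      rw [hM']
      calc res * ((Nat.choose (pre.sum + t).toNat t.toNat : Nat) : Int)
            * ((Nat.factorial (t - 1).toNat : Nat) : Int) * ((pre.prod * prodFact R) * (t * kv))
          = (res * (pre.prod * prodFact R))
            * (((Nat.choose (pre.sum + t).toNat t.toNat : Nat) : Int)
              * (((Nat.factorial (t - 1).toNat : Nat) : Int) * t)) * kv := by ring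
        _ = ((Nat.choose (pre.sum + t).toNat t.toNat : Nat) : Int)
            * ((Nat.factorial t.toNat : Nat) : Int) * ((Nat.factorial pre.sum.toNat : Nat) : Int) * kv := by
            rw [hres, hfactt]; ring
        _ = ((Nat.factorial (pre.sum + t).toNat : Nat) : Int) * kv := by rw [hC]
        _ = kv * Q * ((pre.prod * prodFact R) * (t * kv)) := by
            rw [← hM', hQ]; ring
    have hbody : permcountAltBody (res, pre.sum, pre.getLast?, lastLen R) t
        = (PySem.Int.floordiv (res * ((Nat.choose (pre.sum + t).toNat t.toNat : Nat) : Int)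
            * ((Nat.factorial (t - 1).toNat : Nat) : Int)) kv, pre.sum + t, some t, kv) := rfl
    have hres' : PySem.Int.floordiv (res * ((Nat.choose (pre.sum + t).toNat t.toNat : Nat) : Int)
        * ((Nat.factorial (t - 1).toNat : Nat) : Int)) kv = Q := by
      rw [hX, PySem.Int.floordiv_eq_ediv_of_pos hkvpos,
        Int.mul_ediv_cancel_left _ (ne_of_gt hkvpos)]
    have happ := ih (pre ++ [t]) hpre' hrest' Q (by rw [hsum', mul_comm]; exact hQ.symm)
    have hglt : (pre ++ [t]).getLast? = some t := List.getLast?_concat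
    rw [List.foldl_cons, hbody, hres', ← hsum', ← hglt, ← hkv]
    have hassoc : (pre ++ [t]) ++ rest' = pre ++ t :: rest' := by simp
    rw [hassoc] at happ
    exact happ

-- ===== VERDICT (by name: the statement is the Claim_ definition above) =====
theorem permcount_spec : Claim_equal_permcount := by
  intro v _ hpre
  show permcount v = permcount_alt v
  have hA : permcount v = PySem.Int.floordiv ((Nat.factorial v.sum.toNat : Nat) : Int)
      (v.prod * prodFact (runsOf v)) := by
    unfold permcount
    rw [loopA_eq]
  obtain ⟨hinv, -, -, -⟩ := foldB_inv v [] (by simp) hpre 1 (by simp [runsOf, prodFact])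
  simp only [List.nil_append] at hinv
  have hst : (v.foldl permcountAltBody (1, 0, none, 0)).1 * (v.prod * prodFact (runsOf v))
      = ((Nat.factorial v.sum.toNat : Nat) : Int) := hinv
  have hMpos : 0 < v.prod * prodFact (runsOf v) :=
    mul_pos (List.prod_pos fun a ha => by have := hpre a ha; omega) (prodFact_pos _)
  rw [hA]
  show _ = (v.foldl permcountAltBody (1, 0, none, 0)).1
  rw [← hst, mul_comm, PySem.Int.floordiv_eq_ediv_of_pos hMpos,
    Int.mul_ediv_cancel_left _ (ne_of_gt hMpos)]
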